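-- pv_equiv track=rewrite | github.com/sftfjugg/sysom | sysom_server/sysom_migration/apps/migration/views.py | get_mig_step
-- ===== SOURCE A (Python) =====
-- def get_mig_step(step, flag):
--     steps = [
--         '实施配置',
--         '系统备份',
--         '环境准备',
--         '风险评估',
--         '迁移实施',
--         '重启机器',
--     ]
--     res = []
--     for k,v in enumerate(steps):
--         if k < step:
--             res.append(dict(name=v, value='成功'))
--         if k == step:
--             if flag:
--                 res.append(dict(name=v, value='成功'))
--             else:
--                 res.append(dict(name=v, value='失败'))
--         if k > step:
--             res.append(dict(name=v, value='等待中'))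
--     return dict(migration_step=res)
-- ===== SOURCE B (Python) =====
-- def get_mig_step(step, flag):
--     steps = [
--         '实施配置',
--         '系统备份',
--         '环境准备',
--         '风险评估',
--         '迁移实施',
--         '重启机器',
--     ]
--     n = len(steps)
--     done_end = max(0, min(step, n))
--     wait_start = max(0, min(step + 1, n))
--     res = [dict(name=v, value='成功') for v in steps[:done_end]]
--     if 0 <= step < n:
--         res.append(dict(name=steps[step], value='成功' if flag else '失败'))
--     res += [dict(name=v, value='等待中') for v in steps[wait_start:]]
--     return dict(migration_step=res)
-- ===== Notes on version B (the rewrite author's own statement) =====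
-- stated objective: simpler
-- what changed: Replaces the per-index loop with three independent if-checks by direct construction of three clamped segments (completed slice, optional current element, waiting slice) concatenated.
import Mathlib
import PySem

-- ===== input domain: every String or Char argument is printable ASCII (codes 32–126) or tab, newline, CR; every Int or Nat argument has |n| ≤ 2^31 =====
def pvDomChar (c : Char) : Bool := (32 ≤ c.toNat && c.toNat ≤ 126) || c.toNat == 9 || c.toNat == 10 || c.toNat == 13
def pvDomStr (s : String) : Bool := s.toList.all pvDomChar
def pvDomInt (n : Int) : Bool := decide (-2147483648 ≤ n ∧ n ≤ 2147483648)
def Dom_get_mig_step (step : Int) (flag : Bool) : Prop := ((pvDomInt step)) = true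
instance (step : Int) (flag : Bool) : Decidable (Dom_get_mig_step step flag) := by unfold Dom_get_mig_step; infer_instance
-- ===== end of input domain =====

-- B replaces A's per-index loop with three if-checks by three clamped segments (done / current / waiting) concatenated; objective: simpler.

-- ===== PORT A =====
def pvStepsA : List String := ["实施配置", "系统备份", "环境准备", "风险评估", "迁移实施", "重启机器"]

-- the body of A's for-loop, step for step
def pvBodyA (step : Int) (flag : Bool)
    (res : List (List (String × String))) (kv : Int × String) : List (List (String × String)) :=
  let k := kv.1
  let v := kv.2
  let res := if k < step then res ++ [[("name", v), ("value", "成功")]] else res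
  let res := if k = step then
      (if flag then res ++ [[("name", v), ("value", "成功")]]
       else res ++ [[("name", v), ("value", "失败")]])
    else res
  if k > step then res ++ [[("name", v), ("value", "等待中")]] else res

def get_mig_step (step : Int) (flag : Bool) : List (String × List (List (String × String))) :=
  let res := (PySem.List.enumerate pvStepsA).foldl (pvBodyA step flag) []
  [("migration_step", res)]

-- ===== PORT B =====
def pvStepsB : List String := ["实施配置", "系统备份", "环境准备", "风险评估", "迁移实施", "重启机器"]

def get_mig_step_alt (step : Int) (flag : Bool) : List (String × List (List (String × String))) :=
  let n : Int := pvStepsB.length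
  let doneEnd : Int := max 0 (min step n)
  let waitStart : Int := max 0 (min (step + 1) n)
  let done := (PySem.List.slice pvStepsB none (some doneEnd)).map
    (fun v => [("name", v), ("value", "成功")])
  let cur : List (List (String × String)) :=
    if 0 ≤ step ∧ step < n then
      ((PySem.List.pyGet? pvStepsB step).elim []
        (fun v => [[("name", v), ("value", if flag then "成功" else "失败")]]))
    else []
  let wait := (PySem.List.slice pvStepsB (some waitStart) none).map
    (fun v => [("name", v), ("value", "等待中")])
  [("migration_step", done ++ cur ++ wait)]

-- ===== PRECONDITION & SPEC =====
def Spec_get_mig_step (step : Int) (flag : Bool) (out : List (String × List (List (String × String)))) : Prop := out = get_mig_step_alt step flag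
instance (step : Int) (flag : Bool) (out : List (String × List (List (String × String)))) : Decidable (Spec_get_mig_step step flag out) := by unfold Spec_get_mig_step; infer_instance

-- ===== CLAIM (what is proved, stated in full; the proofs are below) =====
def Claim_equal_get_mig_step : Prop := ∀ (step : Int) (flag : Bool), Dom_get_mig_step step flag → Spec_get_mig_step step flag (get_mig_step step flag)

-- ===== LEMMAS AND PROOFS =====

theorem pv_body_gt (step : Int) (flag : Bool) (acc : List (List (String × String)))
    (k : Int) (v : String) (h : step < k) :
    pvBodyA step flag acc (k, v) = acc ++ [[("name", v), ("value", "等待中")]] := by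
  have h1 : ¬ (k < step) := by omega
  have h2 : ¬ (k = step) := by omega
  simp [pvBodyA, h, h1, h2]

theorem pv_body_lt (step : Int) (flag : Bool) (acc : List (List (String × String)))
    (k : Int) (v : String) (h : k < step) :
    pvBodyA step flag acc (k, v) = acc ++ [[("name", v), ("value", "成功")]] := by
  have h2 : ¬ (k = step) := by omega
  have h3 : ¬ (k > step) := by omega
  simp [pvBodyA, h, h2, h3]

-- For step below every index, A's fold appends only waiting entries.
theorem pv_foldA_low (step : Int) (flag : Bool) (xs : List String) :
    ∀ (s : Int) (acc : List (List (String × String))), step < s →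
    (PySem.List.enumerate xs s).foldl (pvBodyA step flag) acc
      = acc ++ xs.map (fun v => [("name", v), ("value", "等待中")]) := by
  induction xs with
  | nil => intro s acc _; simp [PySem.List.enumerate_nil]
  | cons x xs ih =>
    intro s acc hs
    rw [PySem.List.enumerate_cons, List.foldl_cons, pv_body_gt step flag acc s x hs,
      ih (s + 1) _ (by omega)]
    simp

-- For step at or above every index, A's fold appends only success entries.
theorem pv_foldA_high (step : Int) (flag : Bool) (xs : List String) :
    ∀ (s : Int) (acc : List (List (String × String))), s + xs.length ≤ step →
    (PySem.List.enumerate xs s).foldl (pvBodyA step flag) acc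
      = acc ++ xs.map (fun v => [("name", v), ("value", "成功")]) := by
  induction xs with
  | nil => intro s acc _; simp [PySem.List.enumerate_nil]
  | cons x xs ih =>
    intro s acc hs
    simp only [List.length_cons] at hs
    rw [PySem.List.enumerate_cons, List.foldl_cons,
      pv_body_lt step flag acc s x (by omega), ih (s + 1) _ (by omega)]
    simp

theorem pv_low (step : Int) (flag : Bool) (h : step < 0) :
    get_mig_step step flag = get_mig_step_alt step flag := by
  unfold get_mig_step get_mig_step_alt
  rw [pv_foldA_low step flag pvStepsA 0 [] h]
  have hd : max 0 (min step ((pvStepsB.length : Nat) : Int)) = 0 := by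
    simp [pvStepsB]; omega
  have hw : max 0 (min (step + 1) ((pvStepsB.length : Nat) : Int)) = 0 := by
    simp [pvStepsB]; omega
  have hc : ¬ (0 ≤ step ∧ step < ((pvStepsB.length : Nat) : Int)) := by
    simp [pvStepsB]; omega
  simp only [hd, hw, if_neg hc]
  simp [pvStepsA, pvStepsB, PySem.List.slice_to, PySem.List.slice_from]

theorem pv_high (step : Int) (flag : Bool) (h : 6 ≤ step) :
    get_mig_step step flag = get_mig_step_alt step flag := by
  unfold get_mig_step get_mig_step_alt
  rw [pv_foldA_high step flag pvStepsA 0 [] (by simp [pvStepsA]; omega)]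
  have hd : max 0 (min step ((pvStepsB.length : Nat) : Int)) = 6 := by
    simp [pvStepsB]; omega
  have hw : max 0 (min (step + 1) ((pvStepsB.length : Nat) : Int)) = 6 := by
    simp [pvStepsB]; omega
  have hc : ¬ (0 ≤ step ∧ step < ((pvStepsB.length : Nat) : Int)) := by
    simp [pvStepsB]; omega
  simp only [hd, hw, if_neg hc]
  simp [pvStepsA, pvStepsB, PySem.List.slice_to, PySem.List.slice_from]

-- ===== VERDICT (by name: the statement is the Claim_ definition above) =====
theorem get_mig_step_spec : Claim_equal_get_mig_step := by
  intro step flag _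
  unfold Spec_get_mig_step
  rcases lt_or_ge step 0 with h | h
  · exact pv_low step flag h
  rcases lt_or_ge step 6 with h6 | h6
  · interval_cases step <;> cases flag <;> decide
  · exact pv_high step flag h6
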